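-- pv_equiv track=rewrite | github.com/Jiyesss/Programmers | [PCCP#2.3번] 카페 확장.py | solution
-- ===== SOURCE A (Python) =====
-- from collections import deque
--
-- def solution(menu, order, k):
--     max_customer = 0
--     current_customer = 0
--     make_times = deque()  # 음료가 완성되는 시간을 저장하는 큐
--     time = 0
--
--     for i in range(len(order)):
--         arrival_time = i * k
--
--         # 도착한 손님이 현재 시각보다 크면 현재 시각을 도착 시각으로 맞춘다
--         if time < arrival_time:
--             time = arrival_time
--
--         # 현재 시각에 도착한 손님이 있다면 큐에서 음료가 완성되는 시간을 계산
--         while make_times and make_times[0] <= time: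
--             make_times.popleft()
--             current_customer -= 1
--
--         # 새로 도착한 손님에 대해 음료 완성 시간을 큐에 추가
--         finish_time = time + menu[order[i]]
--         make_times.append(finish_time)
--         current_customer += 1
--
--         # 최대 손님 수 갱신
--         if current_customer > max_customer:
--             max_customer = current_customer
--
--         # 다음 손님 도착까지의 시간 증가
--         time += menu[order[i]]
--
--     return max_customer
-- ===== SOURCE B (Python) =====
-- def solution(menu, order, k):
--     n = len(order)
--     # pass 1: serial schedule (start / finish time of each order's service)
--     starts = []
--     t = 0
--     for i, o in enumerate(order):
--         t = max(t, i * k)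
--         starts.append(t)
--         t += menu[o]
--     fins = [s + menu[o] for s, o in zip(starts, order)]
--     # pass 2: departure STEP of each customer (n = stays to the end).
--     # FIFO: a customer cannot leave before the one ahead of it has left.
--     dep = []
--     prev = 0
--     for j in range(n):
--         i = max(j + 1, prev)
--         while i < n and starts[i] < fins[j]:
--             i += 1
--         dep.append(i)
--         prev = i
--     # pass 3: bucket-count departures per step, then one arithmetic sweep
--     departed = [0] * (n + 1)
--     for d in dep:
--         departed[d] += 1
--     best = 0
--     present = 0
--     for i in range(n):
--         present += 1 - departed[i]
--         if present > best:
--             best = present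
--     return best
-- ===== Notes on version B (the rewrite author's own statement) =====
-- stated objective: alternative
-- what changed: Instead of A's online deque simulation over arrival steps, B computes the serial schedule, then iterates over CUSTOMERS to find each one's departure step (respecting FIFO blocking), bucket-counts departures per step, and derives the maximum from a present-count running sweep.
import Mathlib
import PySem

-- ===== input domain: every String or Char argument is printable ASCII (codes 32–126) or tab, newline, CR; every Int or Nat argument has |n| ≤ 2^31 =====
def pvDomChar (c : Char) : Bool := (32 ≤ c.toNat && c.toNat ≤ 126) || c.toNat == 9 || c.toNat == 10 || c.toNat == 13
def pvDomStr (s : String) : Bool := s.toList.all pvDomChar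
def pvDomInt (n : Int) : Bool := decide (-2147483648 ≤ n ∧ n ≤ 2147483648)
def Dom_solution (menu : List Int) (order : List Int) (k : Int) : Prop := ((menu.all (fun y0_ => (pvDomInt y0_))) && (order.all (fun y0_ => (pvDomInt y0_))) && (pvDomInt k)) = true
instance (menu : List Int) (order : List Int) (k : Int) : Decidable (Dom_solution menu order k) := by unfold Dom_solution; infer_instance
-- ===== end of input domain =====

-- B replaces A's online deque simulation by a customer-centric scheme: build the
-- serial schedule, compute each customer's departure step, bucket-count departures
-- and sweep a running present-count; same O(n) cost, objective: alternative.

-- ===== PORT A =====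
-- the 'while make_times and make_times[0] <= time' popping loop
def popA : List Int → Int → Int → List Int × Int
  | [], cur, _ => ([], cur)
  | f :: rest, cur, time =>
      if f ≤ time then popA rest (cur - 1) time else (f :: rest, cur)

-- one iteration of A's for-loop; state = (max_customer, current_customer, make_times, time)
def stepA (menu : List Int) (order : List Int) (k : Int)
    (st : Int × Int × List Int × Int) (i : Int) : Int × Int × List Int × Int :=
  let maxC := st.1
  let arrival := i * k
  let time := if st.2.2.2 < arrival then arrival else st.2.2.2
  let qc := popA st.2.2.1 st.2.1 time
  let dur := (PySem.List.pyGet? menu ((PySem.List.pyGet? order i).getD 0)).getD 0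
  let q := qc.1 ++ [time + dur]
  let cur := qc.2 + 1
  let maxC := if cur > maxC then cur else maxC
  (maxC, cur, q, time + dur)

def solution (menu : List Int) (order : List Int) (k : Int) : Int :=
  ((PySem.List.pyRange 0 (order.length : Int) 1).foldl (stepA menu order k) (0, 0, [], 0)).1

-- ===== PORT B =====
-- menu[o] (Python wraparound indexing; default only taken outside Pre_)
def durB (menu : List Int) (o : Int) : Int := (PySem.List.pyGet? menu o).getD 0

-- pass 1: the serial schedule (start time of each order), carrying time t and index i
def scheduleB (menu : List Int) (k : Int) : List Int → Int → Int → List Int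
  | [], _, _ => []
  | o :: rest, t, i =>
      let t' := max t (i * k)
      t' :: scheduleB menu k rest (t' + durB menu o) (i + 1)

-- the inner 'while i < n and starts[i] < fins[j]' search for customer j's departure step
def srchB (starts : List Int) (fj : Int) (n : Nat) (i : Nat) : Nat :=
  if i < n then (if starts.getD i 0 < fj then srchB starts fj n (i + 1) else i) else i
termination_by n - i

-- pass 2: 'for j in range(n)' building the departure-step list, carrying prev
def depB (starts fins : List Int) (n : Nat) (j prev : Nat) : List Nat :=
  if j < n then
    let i := srchB starts (fins.getD j 0) n (max (j + 1) prev)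
    i :: depB starts fins n (j + 1) i
  else []
termination_by n - j

-- pass 3a: 'departed[d] += 1' bucket counting
def histB (n : Nat) (dep : List Nat) : List Int :=
  dep.foldl (fun h d => h.set d (h.getD d 0 + 1)) (List.replicate (n + 1) (0 : Int))

def solution_alt (menu : List Int) (order : List Int) (k : Int) : Int :=
  let n := order.length
  let starts := scheduleB menu k order 0 0
  let fins := (starts.zip order).map (fun so => so.1 + durB menu so.2)
  let dep := depB starts fins n 0 0
  let hist := histB n dep
  -- pass 3b: running present-count sweep over the steps
  ((List.range n).foldl
      (fun (pb : Int × Int) i =>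
        let p := pb.1 + 1 - hist.getD i 0
        (p, if p > pb.2 then p else pb.2)) (0, 0)).2

-- ===== PRECONDITION & SPEC =====
-- Pre_ excludes exactly the inputs where A raises IndexError: an order entry out of
-- Python's (wraparound) range for menu.
def Pre_solution (menu : List Int) (order : List Int) (k : Int) : Prop :=
  ∀ o ∈ order, PySem.Raise.InRange menu.length o
instance (menu : List Int) (order : List Int) (k : Int) : Decidable (Pre_solution menu order k) := by unfold Pre_solution; infer_instance

def pvWitness_solution : List Int × List Int × Int := ([5, 12, 3], [1, 2, 0, 1], 5)

def Spec_solution (menu : List Int) (order : List Int) (k : Int) (out : Int) : Prop := out = solution_alt menu order k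
instance (menu : List Int) (order : List Int) (k : Int) (out : Int) : Decidable (Spec_solution menu order k out) := by unfold Spec_solution; infer_instance

-- ===== CLAIM (what is proved, stated in full; the proofs are below) =====
def Claim_equal_solution : Prop := ∀ (menu : List Int) (order : List Int) (k : Int), Dom_solution menu order k → Pre_solution menu order k → Spec_solution menu order k (solution menu order k)

-- ===== LEMMAS AND PROOFS =====

-- index-based duration, start, finish and carried time of the serial schedule
def dN (menu : List Int) (order : List Int) (i : Nat) : Int :=
  durB menu (order.getD i 0)

def Tt (menu : List Int) (order : List Int) (k : Int) : Nat → Int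
  | 0 => 0
  | i + 1 => max (Tt menu order k i) ((i : Int) * k) + dN menu order i

def Ss (menu : List Int) (order : List Int) (k : Int) (i : Nat) : Int :=
  max (Tt menu order k i) ((i : Int) * k)

def Ff (menu : List Int) (order : List Int) (k : Int) (i : Nat) : Int :=
  Ss menu order k i + dN menu order i

-- the abstract pointer advance corresponding to A's popping (proof-level)
def advanceB (fins : List Int) (i : Int) (s : Int) (p : Nat) : Nat :=
  if h : (p : Int) < i then
    if fins.getD p 0 ≤ s then advanceB fins i s (p + 1) else p
  else p
termination_by (i - p).toNat
decreasing_by omega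

-- abstract sweep over enumerate(starts) with pointer p and running best (proof-level)
def sweepB (fins : List Int) : List (Int × Int) → Nat → Int → Int
  | [], _, best => best
  | (i, s) :: rest, p, best =>
      let p' := advanceB fins i s p
      sweepB fins rest p' (max best (i - (p' : Int) + 1))

theorem sched_eq (menu : List Int) (order : List Int) (k : Int) :
    ∀ (rest : List Int) (i : Nat), rest = order.drop i →
    scheduleB menu k rest (Tt menu order k i) (i : Int)
      = (List.range' i rest.length).map (Ss menu order k) := by
  intro rest
  induction rest with
  | nil => intro i _; simp [scheduleB]
  | cons o rest' ih =>
      intro i h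
      have ho : order[i]?.getD 0 = o := by
        have h0 : (order.drop i)[0]? = some o := by rw [← h]; rfl
        rw [List.getElem?_drop] at h0
        simp only [Nat.add_zero] at h0
        simp [h0]
      have hr : rest' = order.drop (i + 1) := by
        have := congrArg List.tail h
        simpa [List.tail_drop] using this
      simp only [scheduleB, List.length_cons, List.range'_succ, List.map_cons]
      congr 1
      · have : Tt menu order k i ⊔ ↑i * k + durB menu o = Tt menu order k (i + 1) := by
          simp [Tt, dN, List.getD, ho]
        rw [this, show (i : Int) + 1 = ((i + 1 : Nat) : Int) by push_cast; ring]
        exact ih (i + 1) hr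

theorem fins_eq (menu : List Int) (order : List Int) (k : Int) :
    (((List.range' 0 order.length).map (Ss menu order k)).zip order).map
        (fun so => so.1 + durB menu so.2)
      = (List.range' 0 order.length).map (Ff menu order k) := by
  have aux : ∀ (rest : List Int) (i : Nat), rest = order.drop i →
      (((List.range' i rest.length).map (Ss menu order k)).zip rest).map
          (fun so => so.1 + durB menu so.2)
        = (List.range' i rest.length).map (Ff menu order k) := by
    intro rest
    induction rest with
    | nil => intro i _; simp
    | cons o rest' ih =>
        intro i h
        have ho : order[i]?.getD 0 = o := by
          have h0 : (order.drop i)[0]? = some o := by rw [← h]; rfl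
          rw [List.getElem?_drop] at h0
          simp only [Nat.add_zero] at h0
          simp [h0]
        have hr : rest' = order.drop (i + 1) := by
          have := congrArg List.tail h
          simpa [List.tail_drop] using this
        simp only [List.length_cons, List.range'_succ, List.map_cons, List.zip_cons_cons]
        rw [ih (i + 1) hr]
        simp [Ff, dN, List.getD, ho]
  have h0 : order = order.drop 0 := rfl
  have := aux order 0 h0
  simpa using this

theorem fins_getD (menu : List Int) (order : List Int) (k : Int)
    (fins : List Int) (hf : fins = (List.range' 0 order.length).map (Ff menu order k)) :
    ∀ p, p < order.length → fins.getD p 0 = Ff menu order k p := by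
  intro p hp
  subst hf
  simp [List.getD, hp]

theorem pop_adv (menu : List Int) (order : List Int) (k : Int)
    (fins : List Int) (hf : fins = (List.range' 0 order.length).map (Ff menu order k))
    (s : Int) :
    ∀ (len p : Nat) (cur : Int) (i : Int), i = ((p + len : Nat) : Int) →
      p + len ≤ order.length →
    popA ((List.range' p len).map (Ff menu order k)) cur s
      = ((List.range' (advanceB fins i s p) (p + len - advanceB fins i s p)).map
           (Ff menu order k),
         cur - ((advanceB fins i s p : Int) - (p : Int))) := by
  intro len
  induction len with
  | zero =>
      intro p cur i hi hle
      rw [advanceB, dif_neg (by omega)]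
      simp [popA]
  | succ len ih =>
      intro p cur i hi hle
      have hpn : p < order.length := by omega
      have hcond : fins.getD p 0 = Ff menu order k p := fins_getD menu order k fins hf p hpn
      rw [List.range'_succ, List.map_cons]
      rw [advanceB, dif_pos (by omega)]
      by_cases hs : Ff menu order k p ≤ s
      · rw [if_pos (by rw [hcond]; exact hs)]
        simp only [popA, if_pos hs]
        have hrec := ih (p + 1) (cur - 1) i (by omega) (by omega)
        rw [show (p + 1) + len = p + (len + 1) from by omega] at hrec
        rw [hrec]
        congr 1
        push_cast
        ring
      · rw [if_neg (by rw [hcond]; exact hs)]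
        simp only [popA, if_neg hs]
        congr 1
        · rw [show p + (len + 1) - p = len + 1 by omega, List.range'_succ, List.map_cons]
        · omega

theorem adv_le (fins : List Int) (i : Int) (s : Int) :
    ∀ p : Nat, (p : Int) ≤ i → (advanceB fins i s p : Int) ≤ i ∧ p ≤ advanceB fins i s p := by
  intro p
  induction p using advanceB.induct fins i s with
  | case1 p h hle ih =>
      intro _
      rw [advanceB, dif_pos h, if_pos hle]
      have := ih (by omega)
      omega
  | case2 p h hgt =>
      intro hp
      rw [advanceB, dif_pos h, if_neg hgt]
      omega
  | case3 p h =>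
      intro hp
      rw [advanceB, dif_neg h]
      omega

theorem main_loop (menu : List Int) (order : List Int) (k : Int)
    (fins : List Int) (hf : fins = (List.range' 0 order.length).map (Ff menu order k)) :
    ∀ (m i p : Nat) (best : Int), p ≤ i → i + m ≤ order.length →
    (((List.range' i m).map (fun (j : Nat) => (j : Int))).foldl (stepA menu order k)
        (best, (i : Int) - (p : Int), (List.range' p (i - p)).map (Ff menu order k),
         Tt menu order k i)).1
      = sweepB fins ((List.range' i m).map (fun (j : Nat) => ((j : Int), Ss menu order k j))) p best := by
  intro m
  induction m with
  | zero => intro i p best hpi hin; simp [sweepB]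
  | succ m ih =>
      intro i p best hpi hin
      rw [List.range'_succ, List.map_cons, List.map_cons, List.foldl_cons]
      have hadv := adv_le fins (i : Int) (Ss menu order k i) p (by exact_mod_cast hpi)
      set p' := advanceB fins (i : Int) (Ss menu order k i) p with hp'
      have hp'le : p' ≤ i := by exact_mod_cast hadv.1
      have htime : (if Tt menu order k i < (i : Int) * k then (i : Int) * k
          else Tt menu order k i) = Ss menu order k i := by
        rw [Ss, max_def]; split_ifs <;> omega
      have hpop := pop_adv menu order k fins hf (Ss menu order k i) (i - p) p
        ((i : Int) - (p : Int)) (i : Int) (by norm_cast; omega) (by omega)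
      have hstep : stepA menu order k
            (best, (i : Int) - (p : Int),
             (List.range' p (i - p)).map (Ff menu order k), Tt menu order k i) (i : Int)
          = (max best ((i : Int) - (p' : Int) + 1), ((i + 1 : Nat) : Int) - (p' : Int),
             (List.range' p' ((i + 1) - p')).map (Ff menu order k),
             Tt menu order k (i + 1)) := by
        simp only [stepA, htime]
        rw [hpop]
        have hdur : (PySem.List.pyGet? menu
            ((PySem.List.pyGet? order (i : Int)).getD 0)).getD 0 = dN menu order i := by
          simp [PySem.List.pyGet?_natCast, dN, durB, List.getD]
        rw [hdur]
        have hq : (List.range' p' (p + (i - p) - p')).map (Ff menu order k)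
              ++ [Ss menu order k i + dN menu order i]
            = (List.range' p' ((i + 1) - p')).map (Ff menu order k) := by
          rw [show p + (i - p) - p' = i - p' from by omega,
            show (i + 1) - p' = (i - p') + 1 from by omega, List.range'_concat,
            List.map_append]
          congr 1
          rw [show p' + 1 * (i - p') = i from by omega]
          simp [Ff]
        rw [hq]
        have hTt : Ss menu order k i + dN menu order i = Tt menu order k (i + 1) := by
          simp [Tt, Ss]
        have hcur : (i : Int) - (p : Int) - ((p' : Int) - (p : Int)) + 1
            = (i : Int) - (p' : Int) + 1 := by ring
        have hmax : (if (i : Int) - (p : Int) - ((p' : Int) - (p : Int)) + 1 > best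
              then (i : Int) - (p : Int) - ((p' : Int) - (p : Int)) + 1 else best)
            = max best ((i : Int) - (p' : Int) + 1) := by
          rw [hcur, max_def]; split_ifs <;> omega
        rw [hmax, hTt]
        refine congrArg₂ Prod.mk rfl (congrArg₂ Prod.mk (by push_cast; ring) rfl)
      rw [hstep]
      have hrec := ih (i + 1) p' (max best ((i : Int) - (p' : Int) + 1))
        (by omega) (by omega)
      rw [hrec]
      simp only [sweepB]
      rfl

theorem pyRange_cast (n : Nat) :
    PySem.List.pyRange 0 (n : Int) 1 = (List.range' 0 n).map (fun (j : Nat) => (j : Int)) := by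
  induction n with
  | zero => simp [PySem.List.pyRange_one_eq_nil]
  | succ n ih =>
      rw [show ((n + 1 : Nat) : Int) = (n : Int) + 1 by push_cast; ring,
        PySem.List.pyRange_one_succ_right (by positivity), ih, List.range'_concat]
      simp

-- ---------- spec-level departure steps ----------

def srchS (menu : List Int) (order : List Int) (k : Int) (j x : Nat) : Nat :=
  if x < order.length then
    (if Ss menu order k x < Ff menu order k j then srchS menu order k j (x + 1) else x)
  else x
termination_by order.length - x

def depPrev (menu : List Int) (order : List Int) (k : Int) : Nat → Nat
  | 0 => 0
  | j + 1 => srchS menu order k j (max (j + 1) (depPrev menu order k j))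

def depS (menu : List Int) (order : List Int) (k : Int) (j : Nat) : Nat :=
  depPrev menu order k (j + 1)

theorem srch_ge (menu : List Int) (order : List Int) (k : Int) (j : Nat) :
    ∀ x, x ≤ srchS menu order k j x := by
  intro x
  induction x using srchS.induct menu order k j with
  | case1 x h hlt ih => rw [srchS, if_pos h, if_pos hlt]; omega
  | case2 x h hge => rw [srchS, if_pos h, if_neg hge]
  | case3 x h => rw [srchS, if_neg h]

theorem srch_le (menu : List Int) (order : List Int) (k : Int) (j : Nat) :
    ∀ x, x ≤ order.length → srchS menu order k j x ≤ order.length := by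
  intro x
  induction x using srchS.induct menu order k j with
  | case1 x h hlt ih => intro _; rw [srchS, if_pos h, if_pos hlt]; exact ih (by omega)
  | case2 x h hge => intro hx; rw [srchS, if_pos h, if_neg hge]; exact hx
  | case3 x h => intro hx; rw [srchS, if_neg h]; exact hx

theorem srch_stop (menu : List Int) (order : List Int) (k : Int) (j : Nat) :
    ∀ x, srchS menu order k j x < order.length →
      Ff menu order k j ≤ Ss menu order k (srchS menu order k j x) := by
  intro x
  induction x using srchS.induct menu order k j with
  | case1 x h hlt ih => rw [srchS, if_pos h, if_pos hlt]; exact ih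
  | case2 x h hge => rw [srchS, if_pos h, if_neg hge]; intro _; omega
  | case3 x h => rw [srchS, if_neg h]; intro hx; omega

theorem srch_le_of (menu : List Int) (order : List Int) (k : Int) (j : Nat) :
    ∀ x m, x ≤ m → m < order.length → Ff menu order k j ≤ Ss menu order k m →
      srchS menu order k j x ≤ m := by
  intro x
  induction x using srchS.induct menu order k j with
  | case1 x h hlt ih =>
      intro m hxm hm hFf
      rw [srchS, if_pos h, if_pos hlt]
      have hxne : x ≠ m := by rintro rfl; omega
      exact ih m (by omega) hm hFf
  | case2 x h hge => intro m hxm hm hFf; rw [srchS, if_pos h, if_neg hge]; exact hxm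
  | case3 x h => intro m hxm hm hFf; rw [srchS, if_neg h]; exact hxm

theorem depPrev_le (menu : List Int) (order : List Int) (k : Int) :
    ∀ j, j ≤ order.length → depPrev menu order k j ≤ order.length := by
  intro j
  induction j with
  | zero => intro _; simp [depPrev]
  | succ j ih =>
      intro hj
      rw [depPrev]
      exact srch_le menu order k j _ (by have := ih (by omega); omega)

theorem dep_gt (menu : List Int) (order : List Int) (k : Int) (j : Nat) :
    j < depS menu order k j := by
  have := srch_ge menu order k j (max (j + 1) (depPrev menu order k j))
  unfold depS depPrev
  omega

theorem dep_mono (menu : List Int) (order : List Int) (k : Int) :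
    ∀ j j', j ≤ j' → depS menu order k j ≤ depS menu order k j' := by
  have hstep : ∀ j, depS menu order k j ≤ depS menu order k (j + 1) := by
    intro j
    have h1 := srch_ge menu order k (j + 1) (max (j + 2) (depPrev menu order k (j + 1)))
    show depS menu order k j ≤ srchS menu order k (j + 1) (max (j + 2) (depPrev menu order k (j + 1)))
    have : depPrev menu order k (j + 1) = depS menu order k j := rfl
    omega
  intro j j' hle
  induction j' with
  | zero => have : j = 0 := by omega
            simp [this]
  | succ j' ih =>
      rcases Nat.lt_or_ge j (j' + 1) with h | h
      · exact le_trans (ih (by omega)) (hstep j')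
      · have : j = j' + 1 := by omega
        simp [this]

theorem dep_le (menu : List Int) (order : List Int) (k : Int) (j : Nat) :
    j < order.length → depS menu order k j ≤ order.length := by
  intro hj
  have h := depPrev_le menu order k (j + 1) (by omega)
  exact h

-- ---------- pointer chain and its bridge to departure steps ----------

def Qb (fins : List Int) (menu : List Int) (order : List Int) (k : Int) : Nat → Nat
  | 0 => 0
  | i + 1 => advanceB fins (i : Int) (Ss menu order k i) (Qb fins menu order k i)

theorem adv_min (fins : List Int) (iN : Nat) (s : Int) :
    ∀ p y : Nat, p ≤ y → y < advanceB fins (iN : Int) s p →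
      y < iN ∧ fins.getD y 0 ≤ s := by
  intro p
  induction p using advanceB.induct fins (iN : Int) s with
  | case1 p h hle ih =>
      intro y hpy hy
      rw [advanceB, dif_pos h, if_pos hle] at hy
      rcases Nat.eq_or_lt_of_le hpy with rfl | hlt
      · exact ⟨by exact_mod_cast h, hle⟩
      · exact ih y (by omega) hy
  | case2 p h hgt =>
      intro y hpy hy
      rw [advanceB, dif_pos h, if_neg hgt] at hy
      omega
  | case3 p h =>
      intro y hpy hy
      rw [advanceB, dif_neg h] at hy
      omega

theorem adv_stop (fins : List Int) (iN : Nat) (s : Int) :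
    ∀ p : Nat, advanceB fins (iN : Int) s p < iN →
      s < fins.getD (advanceB fins (iN : Int) s p) 0 := by
  intro p
  induction p using advanceB.induct fins (iN : Int) s with
  | case1 p h hle ih =>
      rw [advanceB, dif_pos h, if_pos hle]
      exact ih
  | case2 p h hgt =>
      rw [advanceB, dif_pos h, if_neg hgt]
      intro _
      omega
  | case3 p h =>
      rw [advanceB, dif_neg h]
      intro hp
      exfalso
      have : (p : Int) < (iN : Int) := by exact_mod_cast hp
      exact h this

-- counting view
def cntS (menu : List Int) (order : List Int) (k : Int) (i : Nat) : Nat :=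
  (List.range order.length).countP (fun j => depS menu order k j ≤ i)

theorem countP_range_lt (c n : Nat) :
    (List.range n).countP (fun j => decide (j < c)) = min c n := by
  induction n with
  | zero => simp
  | succ n ih =>
      rw [List.range_succ, List.countP_append, ih]
      simp only [List.countP_cons, List.countP_nil]
      by_cases h : n < c
      · simp [h]; omega
      · simp [h]; omega

theorem cnt_char (menu : List Int) (order : List Int) (k : Int) (i c : Nat)
    (hcn : c ≤ order.length)
    (h1 : ∀ j, j < c → depS menu order k j ≤ i)
    (h2 : c < order.length → i < depS menu order k c) :
    cntS menu order k i = c := by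
  unfold cntS
  have hcongr : ∀ j ∈ List.range order.length,
      (decide (depS menu order k j ≤ i) = true ↔ decide (j < c) = true) := by
    intro j hj
    rw [List.mem_range] at hj
    by_cases hjc : j < c
    · simp [hjc, h1 j hjc]
    · have hc : c < order.length := by omega
      have := lt_of_lt_of_le (h2 hc) (dep_mono menu order k c j (by omega))
      simp [hjc]
      omega
  rw [List.countP_congr hcongr, countP_range_lt]
  omega

theorem bridge (menu : List Int) (order : List Int) (k : Int)
    (fins : List Int) (hf : fins = (List.range' 0 order.length).map (Ff menu order k)) :
    ∀ i, i < order.length →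
      Qb fins menu order k (i + 1) ≤ i + 1 ∧
      (∀ j, j < Qb fins menu order k (i + 1) → depS menu order k j ≤ i) ∧
      (Qb fins menu order k (i + 1) < order.length →
        i < depS menu order k (Qb fins menu order k (i + 1))) := by
  intro i
  induction i with
  | zero =>
      intro _
      simp only [Nat.zero_add]
      have h0 : Qb fins menu order k 1 = 0 := by
        show advanceB fins ((0 : Nat) : Int) (Ss menu order k 0) (Qb fins menu order k 0) = 0
        have : Qb fins menu order k 0 = 0 := rfl
        rw [this, advanceB, dif_neg (by norm_num)]
      refine ⟨by omega, ?_, ?_⟩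
      · intro j hj; rw [h0] at hj; omega
      · intro _; rw [h0]; exact dep_gt menu order k 0
  | succ i ih =>
      intro hin
      obtain ⟨hq1, hq2, hq3⟩ := ih (by omega)
      set q := Qb fins menu order k (i + 1) with hqdef
      have hQ : Qb fins menu order k (i + 2)
          = advanceB fins ((i + 1 : Nat) : Int) (Ss menu order k (i + 1)) q := rfl
      set q' := Qb fins menu order k (i + 2) with hq'def
      have hadv := adv_le fins ((i + 1 : Nat) : Int) (Ss menu order k (i + 1)) q
        (by push_cast; omega)
      rw [← hQ] at hadv
      have hq'le : q' ≤ i + 1 := by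
        have := hadv.1
        omega
      have hqq' : q ≤ q' := hadv.2
      have hb : ∀ j, j < q' → depS menu order k j ≤ i + 1 := by
        intro j
        induction j using Nat.strong_induction_on with
        | _ j ihj =>
          intro hj
          by_cases hjq : j < q
          · exact le_trans (hq2 j hjq) (by omega)
          · have hmin := adv_min fins (i + 1) (Ss menu order k (i + 1)) q j (by omega)
              (by rw [← hQ]; exact hj)
            have hjn : j < order.length := by omega
            have hFf : Ff menu order k j ≤ Ss menu order k (i + 1) := by
              rw [← fins_getD menu order k fins hf j hjn]; exact hmin.2
            have hprev : depPrev menu order k j ≤ i + 1 := by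
              cases j with
              | zero => simp [depPrev]
              | succ j0 =>
                  have he : depPrev menu order k (j0 + 1) = depS menu order k j0 := rfl
                  have := ihj j0 (by omega) (by omega)
                  omega
            show srchS menu order k j (max (j + 1) (depPrev menu order k j)) ≤ i + 1
            exact srch_le_of menu order k j _ (i + 1) (by omega) hin hFf
      refine ⟨by omega, hb, ?_⟩
      intro hq'n
      rcases Nat.eq_or_lt_of_le hq'le with heq | hlt
      · rw [heq]; exact dep_gt menu order k (i + 1)
      · have hstop := adv_stop fins (i + 1) (Ss menu order k (i + 1)) q
          (by rw [← hQ]; exact_mod_cast hlt)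
        rw [← hQ] at hstop
        rw [fins_getD menu order k fins hf q' hq'n] at hstop
        have hqn : q < order.length := by omega
        have hiq' : i < depS menu order k q' :=
          lt_of_lt_of_le (hq3 hqn) (dep_mono menu order k q q' hqq')
        have hne : depS menu order k q' ≠ i + 1 := by
          intro heq2
          have hsr : srchS menu order k q' (max (q' + 1) (depPrev menu order k q'))
              = i + 1 := heq2
          have hst := srch_stop menu order k q'
            (max (q' + 1) (depPrev menu order k q')) (by rw [hsr]; exact hin)
          rw [hsr] at hst
          omega
        omega

theorem Qb_eq_cnt (menu : List Int) (order : List Int) (k : Int)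
    (fins : List Int) (hf : fins = (List.range' 0 order.length).map (Ff menu order k)) :
    ∀ i, i < order.length → Qb fins menu order k (i + 1) = cntS menu order k i := by
  intro i hin
  obtain ⟨h1, h2, h3⟩ := bridge menu order k fins hf i hin
  exact (cnt_char menu order k i (Qb fins menu order k (i + 1)) (by omega) h2 h3).symm

theorem sweep_eval (menu : List Int) (order : List Int) (k : Int)
    (fins : List Int) (hf : fins = (List.range' 0 order.length).map (Ff menu order k)) :
    ∀ (m i : Nat) (best : Int), i + m ≤ order.length →
    sweepB fins ((List.range' i m).map (fun (j : Nat) => ((j : Int), Ss menu order k j)))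
        (Qb fins menu order k i) best
      = (List.range' i m).foldl
          (fun best (j : Nat) => max best ((j : Int) + 1 - (cntS menu order k j : Int))) best := by
  intro m
  induction m with
  | zero => intro i best _; simp [sweepB]
  | succ m ih =>
      intro i best hin
      rw [List.range'_succ, List.map_cons, List.foldl_cons]
      simp only [sweepB]
      have hQ : advanceB fins (i : Int) (Ss menu order k i) (Qb fins menu order k i)
          = Qb fins menu order k (i + 1) := rfl
      rw [hQ, Qb_eq_cnt menu order k fins hf i (by omega)]
      have hval : max best ((i : Int) - ((cntS menu order k i : Nat) : Int) + 1)
          = max best ((i : Int) + 1 - ((cntS menu order k i : Nat) : Int)) := by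
        congr 1; ring
      rw [hval, ← Qb_eq_cnt menu order k fins hf i (by omega)]
      exact ih (i + 1) _ (by omega)

-- ---------- B-port correspondence ----------

theorem starts_getD (menu : List Int) (order : List Int) (k : Int)
    (starts : List Int) (hs : starts = (List.range' 0 order.length).map (Ss menu order k)) :
    ∀ p, p < order.length → starts.getD p 0 = Ss menu order k p := by
  intro p hp
  subst hs
  simp [List.getD, hp]

theorem srchB_eq (menu : List Int) (order : List Int) (k : Int)
    (starts : List Int) (hs : starts = (List.range' 0 order.length).map (Ss menu order k))
    (j : Nat) :
    ∀ x, srchB starts (Ff menu order k j) order.length x = srchS menu order k j x := by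
  intro x
  induction x using srchS.induct menu order k j with
  | case1 x h hlt ih =>
      rw [srchS, if_pos h, if_pos hlt, srchB, if_pos h,
        if_pos (by rw [starts_getD menu order k starts hs x h]; exact hlt)]
      exact ih
  | case2 x h hge =>
      rw [srchS, if_pos h, if_neg hge, srchB, if_pos h,
        if_neg (by rw [starts_getD menu order k starts hs x h]; exact hge)]
  | case3 x h =>
      rw [srchS, if_neg h, srchB, if_neg h]

theorem depB_eq (menu : List Int) (order : List Int) (k : Int)
    (starts fins : List Int)
    (hs : starts = (List.range' 0 order.length).map (Ss menu order k))
    (hf : fins = (List.range' 0 order.length).map (Ff menu order k)) :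
    ∀ (m j : Nat), j + m = order.length →
    depB starts fins order.length j (depPrev menu order k j)
      = (List.range' j m).map (depS menu order k) := by
  intro m
  induction m with
  | zero => intro j hj; rw [depB, if_neg (by omega)]; simp
  | succ m ih =>
      intro j hj
      rw [depB, if_pos (by omega)]
      simp only
      have hstep : srchB starts (fins.getD j 0) order.length
            (max (j + 1) (depPrev menu order k j)) = depS menu order k j := by
        rw [fins_getD menu order k fins hf j (by omega),
          srchB_eq menu order k starts hs j]
        rfl
      rw [List.range'_succ, List.map_cons, hstep]
      congr 1
      have : depS menu order k j = depPrev menu order k (j + 1) := rfl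
      rw [this]
      exact ih (j + 1) (by omega)

theorem hist_gen (i : Nat) :
    ∀ (l : List Nat) (h : List Int), (∀ d ∈ l, d < h.length) →
    (l.foldl (fun h d => h.set d (h.getD d 0 + 1)) h).getD i 0
      = h.getD i 0 + (l.count i : Int) := by
  intro l
  induction l with
  | nil => intro h _; simp
  | cons d l ih =>
      intro h hlen
      have hd : d < h.length := hlen d (by simp)
      rw [List.foldl_cons]
      have hrec := ih (h.set d (h.getD d 0 + 1))
        (by intro e he; rw [List.length_set]; exact hlen e (by simp [he]))
      rw [hrec]
      have hset : (h.set d (h.getD d 0 + 1)).getD i 0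
          = if d = i then h.getD d 0 + 1 else h.getD i 0 := by
        by_cases hdi : d = i
        · subst hdi; simp [List.getD_eq_getElem?_getD, hd]
        · simp [List.getD_eq_getElem?_getD, List.getElem?_set_ne hdi, hdi]
      rw [hset, List.count_cons]
      by_cases hdi : d = i
      · subst hdi; simp; ring
      · have hbe : (d == i) = false := by simpa using hdi
        simp [hdi, hbe]

theorem countP_le_split (i : Nat) :
    ∀ l : List Nat,
      l.countP (fun d => decide (d ≤ i)) = l.countP (fun d => decide (d < i)) + l.count i := by
  intro l
  induction l with
  | nil => simp
  | cons d t ih =>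
      simp only [List.countP_cons, List.count_cons, ih]
      have hbe : (d == i) = decide (d = i) := by
        by_cases h : d = i <;> simp [h]
      rw [hbe]
      by_cases h1 : d ≤ i <;> by_cases h2 : d < i <;> by_cases h3 : d = i <;>
        (try simp [h1, h2, h3]) <;> omega

theorem bfold_eval (menu : List Int) (order : List Int) (k : Int)
    (hist : List Int)
    (hh : ∀ j, j < order.length →
      hist.getD j 0 = (((List.range' 0 order.length).map (depS menu order k)).count j : Int)) :
    ∀ (m i : Nat) (best : Int), i + m ≤ order.length →
    ((List.range' i m).foldl
        (fun (pb : Int × Int) j =>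
          let p := pb.1 + 1 - hist.getD j 0
          (p, if p > pb.2 then p else pb.2))
        ((i : Int) - (((List.range' 0 order.length).map (depS menu order k)).countP
            (fun d => decide (d < i)) : Int), best)).2
      = (List.range' i m).foldl
          (fun best (j : Nat) => max best ((j : Int) + 1 - (cntS menu order k j : Int))) best := by
  have hcnt : ∀ j : Nat, cntS menu order k j
      = ((List.range' 0 order.length).map (depS menu order k)).countP
          (fun d => decide (d ≤ j)) := by
    intro j
    unfold cntS
    rw [List.range_eq_range', List.countP_map]
    rfl
  intro m
  induction m with
  | zero => intro i best _; simp
  | succ m ih =>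
      intro i best hin
      rw [List.range'_succ, List.foldl_cons, List.foldl_cons]
      have hhi := hh i (by omega)
      have hsplit := countP_le_split i ((List.range' 0 order.length).map (depS menu order k))
      have hlt1 : ((List.range' 0 order.length).map (depS menu order k)).countP
            (fun d => decide (d < i + 1)) = cntS menu order k i := by
        rw [hcnt i]
        apply List.countP_congr
        intro d _
        simp
      have hpv : (i : Int) - (((List.range' 0 order.length).map (depS menu order k)).countP
            (fun d => decide (d < i)) : Int) + 1 - hist.getD i 0
          = (i : Int) + 1 - (cntS menu order k i : Int) := by
        rw [hhi]
        have : cntS menu order k i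
            = ((List.range' 0 order.length).map (depS menu order k)).countP
                (fun d => decide (d < i))
              + ((List.range' 0 order.length).map (depS menu order k)).count i := by
          rw [hcnt i, hsplit]
        rw [this]
        push_cast
        ring
      dsimp only
      rw [hpv]
      have hstate : (((i : Int) + 1 - (cntS menu order k i : Int)),
            if (i : Int) + 1 - (cntS menu order k i : Int) > best
            then (i : Int) + 1 - (cntS menu order k i : Int) else best)
          = (((i + 1 : Nat) : Int) - (((List.range' 0 order.length).map (depS menu order k)).countP
                (fun d => decide (d < i + 1)) : Int),
             max best ((i : Int) + 1 - (cntS menu order k i : Int))) := by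
        rw [hlt1]
        exact Prod.ext (by push_cast; ring)
          (by show _ = max best _; rw [max_def]; split_ifs <;> omega)
      rw [hstate]
      exact ih (i + 1) _ (by omega)

-- ===== VERDICT (by name: the statement is the Claim_ definition above) =====
theorem solution_spec : Claim_equal_solution := by
  intro menu order k _ _
  unfold Spec_solution solution solution_alt
  dsimp only
  have hsched : scheduleB menu k order 0 0
      = (List.range' 0 order.length).map (Ss menu order k) := by
    have h := sched_eq menu order k order 0 rfl
    simpa [Tt] using h
  rw [hsched, fins_eq menu order k, pyRange_cast]
  have hdep := depB_eq menu order k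
    ((List.range' 0 order.length).map (Ss menu order k))
    ((List.range' 0 order.length).map (Ff menu order k)) rfl rfl order.length 0 (by omega)
  rw [show depPrev menu order k 0 = 0 from rfl] at hdep
  rw [hdep]
  have hh : ∀ j, j < order.length →
      (histB order.length ((List.range' 0 order.length).map (depS menu order k))).getD j 0
        = (((List.range' 0 order.length).map (depS menu order k)).count j : Int) := by
    intro j hj
    unfold histB
    rw [hist_gen j _ _ ?hlen]
    · have hz : (List.replicate (order.length + 1) (0 : Int)).getD j 0 = 0 := by
        simp [List.getD_eq_getElem?_getD, List.getElem?_replicate]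
        split <;> simp
      rw [hz]; ring
    case hlen =>
      intro d hd
      rw [List.mem_map] at hd
      obtain ⟨j0, hj0, rfl⟩ := hd
      have hj0n : j0 < order.length := by simpa using hj0
      have := dep_le menu order k j0 hj0n
      rw [List.length_replicate]
      omega
  rw [List.range_eq_range']
  have hB := bfold_eval menu order k
    (histB order.length ((List.range' 0 order.length).map (depS menu order k))) hh
    order.length 0 0 (by omega)
  have hz0 : ((0 : Nat) : Int) - ((((List.range' 0 order.length).map (depS menu order k)).countP
      (fun d => decide (d < 0))) : Int) = 0 := by simp
  rw [hz0] at hB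
  rw [hB]
  have hsweep := sweep_eval menu order k
    ((List.range' 0 order.length).map (Ff menu order k)) rfl order.length 0 0 (by omega)
  have hQ0 : Qb ((List.range' 0 order.length).map (Ff menu order k)) menu order k 0 = 0 := rfl
  rw [hQ0] at hsweep
  rw [← hsweep]
  have hA := main_loop menu order k
    ((List.range' 0 order.length).map (Ff menu order k)) rfl order.length 0 0 0
    (le_refl 0) (by omega)
  simpa [Tt] using hA
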